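-- pv_equiv track=rewrite | github.com/raphaelcseb/BackToTheFuture-EP2 | funcoes.py | calcula_pontos_full_house
-- ===== SOURCE A (Python) =====
-- def calcula_pontos_full_house (dados):
--
--     numeros = {}
--
--     for dado in dados:
--         if dado not in numeros:
--             numeros[dado] = 0
--         numeros[dado] += 1
--
--     #Ver se tem apenas dois números diferentes
--
--     contador = 0
--     for numero in numeros.keys():
--         contador +=1
--
--     if contador != 2:
--         return 0
--
--     total = 0
--     for qtd in numeros.values():
--         if qtd == 2 or qtd == 3:
--             total +=1
--
--     soma = 0
--
--     if total == 2:
--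
--         for dado in dados:
--             soma += dado
--
--     return soma
-- ===== SOURCE B (Python) =====
-- def calcula_pontos_full_house(dados):
--     # Partition by the first value: full house iff the rest is one constant
--     # value and the two group sizes are each 2 or 3.
--     if not dados:
--         return 0
--     a = dados[0]
--     resto = [x for x in dados if x != a]
--     if not resto:
--         return 0
--     b = resto[0]
--     if any(x != b for x in resto):
--         return 0
--     ca = len(dados) - len(resto)
--     if ca in (2, 3) and len(resto) in (2, 3):
--         return sum(dados)
--     return 0
-- ===== Notes on version B (the rewrite author's own statement) =====
-- stated objective: simpler
-- what changed: Replaces the hash-map frequency counting (dict build, key count, value scan) by a first-value partition: filter out the first value, check the remainder is one constant value, and test the two group sizes directly.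
import Mathlib
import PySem

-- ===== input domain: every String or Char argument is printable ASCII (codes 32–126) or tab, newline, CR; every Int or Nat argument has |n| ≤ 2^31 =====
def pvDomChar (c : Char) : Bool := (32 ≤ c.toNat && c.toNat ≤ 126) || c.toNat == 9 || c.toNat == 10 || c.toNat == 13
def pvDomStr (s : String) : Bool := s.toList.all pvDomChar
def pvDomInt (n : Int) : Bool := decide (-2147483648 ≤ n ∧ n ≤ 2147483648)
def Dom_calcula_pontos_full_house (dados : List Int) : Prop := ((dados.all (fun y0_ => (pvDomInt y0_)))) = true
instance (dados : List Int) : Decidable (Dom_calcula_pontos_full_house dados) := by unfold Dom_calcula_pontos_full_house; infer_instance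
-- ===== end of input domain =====

-- B replaces A's hash-map frequency counting by a first-value partition with a constancy
-- check on the remainder (objective: simpler); same return value on every input.

-- ===== PORT A =====
def calcula_pontos_full_house (dados : List Int) : Int :=
  let numeros : PySem.Dict Int Int :=
    dados.foldl (fun numeros dado =>
      let numeros := if numeros.contains dado then numeros else numeros.insert dado 0
      numeros.insert dado (numeros.getD dado 0 + 1)) PySem.Dict.empty
  let contador : Int := numeros.keys.foldl (fun contador _ => contador + 1) 0
  if contador ≠ 2 then 0
  else
    let total : Int := numeros.values.foldl
      (fun total qtd => if qtd = 2 ∨ qtd = 3 then total + 1 else total) 0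
    let soma : Int := if total = 2 then dados.foldl (fun soma dado => soma + dado) 0 else 0
    soma

-- ===== PORT B =====
def calcula_pontos_full_house_alt (dados : List Int) : Int :=
  match dados with
  | [] => 0
  | a :: _ =>
    let resto := dados.filter (fun x => x != a)
    match resto with
    | [] => 0
    | b :: _ =>
      if resto.any (fun x => x != b) then 0
      else
        let ca : Int := (dados.length : Int) - (resto.length : Int)
        if (ca = 2 ∨ ca = 3) ∧ (((resto.length : Int)) = 2 ∨ ((resto.length : Int)) = 3)
        then dados.foldl (fun s x => s + x) 0
        else 0

-- ===== PRECONDITION & SPEC =====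
def Spec_calcula_pontos_full_house (dados : List Int) (out : Int) : Prop := out = calcula_pontos_full_house_alt dados
instance (dados : List Int) (out : Int) : Decidable (Spec_calcula_pontos_full_house dados out) := by unfold Spec_calcula_pontos_full_house; infer_instance

-- ===== CLAIM (what is proved, stated in full; the proofs are below) =====
def Claim_equal_calcula_pontos_full_house : Prop := ∀ (dados : List Int), Dom_calcula_pontos_full_house dados → Spec_calcula_pontos_full_house dados (calcula_pontos_full_house dados)

-- ===== LEMMAS AND PROOFS =====

lemma pv_step_eq (d : PySem.Dict Int Int) (x : Int) :
    (let d' := if d.contains x then d else d.insert x (0 : Int)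
     d'.insert x (d'.getD x 0 + 1)) = d.insert x (d.getD x 0 + 1) := by
  by_cases h : d.contains x = true
  · simp [h]
  · simp only [Bool.not_eq_true] at h
    have hg : d.getD x 0 = 0 := by simp [PySem.Dict.getD_of_not_contains, h]
    simp [h, PySem.Dict.getD_insert_self, PySem.Dict.insert_insert_self, hg]

lemma pv_len_fold (l : List Int) : ∀ i : Int, l.foldl (fun c _ => c + 1) i = i + l.length := by
  induction l with
  | nil => simp
  | cons x xs ih => intro i; simp [List.foldl_cons, ih]; ring

lemma pv_cnt_fold (l : List Int) : ∀ i : Int,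
    l.foldl (fun t q => if q = 2 ∨ q = 3 then t + 1 else t) i
      = i + (l.countP fun q => decide (q = 2 ∨ q = 3)) := by
  induction l with
  | nil => simp
  | cons x xs ih =>
    intro i
    by_cases h : x = 2 ∨ x = 3
    · simp [List.foldl_cons, h, ih]; ring
    · simp [List.foldl_cons, h, ih]

-- A's value, characterized through the distinct values and their counts
lemma pv_A_eq (dados : List Int) :
    calcula_pontos_full_house dados =
      if (PySem.Set.ofList dados).length = 2 then
        (if (((PySem.Set.ofList dados).map (fun k => (dados.count k : Int))).countP
              (fun q => decide (q = 2 ∨ q = 3))) = 2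
         then dados.foldl (fun s x => s + x) 0 else 0)
      else 0 := by
  have hstep : (fun (numeros : PySem.Dict Int Int) (dado : Int) =>
      let numeros := if numeros.contains dado then numeros else numeros.insert dado (0:Int)
      numeros.insert dado (numeros.getD dado 0 + 1))
      = fun d x => d.insert x (d.getD x 0 + 1) := funext fun d => funext fun x => pv_step_eq d x
  unfold calcula_pontos_full_house
  rw [hstep, PySem.Dict.foldl_insert_getD_add_one_eq_counter]
  simp only [PySem.Dict.keys_counter, PySem.Dict.values, PySem.Dict.items_counter,
    List.map_map, pv_len_fold, pv_cnt_fold, Function.comp_def]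
  split_ifs <;> first | rfl | omega

lemma pv_nodup_single {L : List Int} (a : Int) (hnd : L.Nodup) (ha : a ∈ L)
    (hall : ∀ x ∈ L, x = a) : L = [a] := by
  cases L with
  | nil => cases ha
  | cons y ys =>
    have hy : y = a := hall y (List.mem_cons_self ..)
    subst hy
    cases ys with
    | nil => rfl
    | cons z zs =>
      exfalso
      have hz : z = y := hall z (by simp)
      have hnm := (List.nodup_cons.mp hnd).1
      exact hnm (List.mem_cons.mpr (Or.inl hz.symm))

theorem pv_main (dados : List Int) :
    calcula_pontos_full_house dados = calcula_pontos_full_house_alt dados := by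
  rw [pv_A_eq]
  cases dados with
  | nil => decide
  | cons a tl =>
    have hhead : (a :: tl).filter (fun x => x != a) = tl.filter (fun x => x != a) := by simp
    cases hr : tl.filter (fun x => x != a) with
    | nil =>
      have hall : ∀ x ∈ a :: tl, x = a := by
        intro x hx
        rcases List.mem_cons.mp hx with h | h
        · exact h
        · by_contra hne
          have hxr : x ∈ tl.filter (fun x => x != a) := List.mem_filter.mpr ⟨h, by simpa using hne⟩
          rw [hr] at hxr; cases hxr
      have hS : PySem.Set.ofList (a :: tl) = [a] :=
        pv_nodup_single a (PySem.Set.nodup_ofList _)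
          ((PySem.Set.mem_ofList ..).mpr (List.mem_cons_self ..))
          (fun x hx => hall x ((PySem.Set.mem_ofList ..).mp hx))
      simp [calcula_pontos_full_house_alt, hhead, hr, hS]
    | cons b resto' =>
      have hbr : b ∈ tl.filter (fun x => x != a) := by rw [hr]; exact List.mem_cons_self ..
      have hb : b ∈ tl ∧ b ≠ a := by
        have h := List.mem_filter.mp hbr; exact ⟨h.1, by simpa using h.2⟩
      by_cases hany : ∃ c ∈ b :: resto', ¬ c = b
      · obtain ⟨c, hc, hcb⟩ := hany
        have hcr : c ∈ tl.filter (fun x => x != a) := by rw [hr]; exact hc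
        have hcm := List.mem_filter.mp hcr
        have hc2 : c ∈ tl ∧ c ≠ a := ⟨hcm.1, by simpa using hcm.2⟩
        have hanyT : (b :: resto').any (fun x => x != b) = true := by
          simp only [List.any_eq_true]; exact ⟨c, hc, by simpa using hcb⟩
        have hsub : [a, b, c] ⊆ PySem.Set.ofList (a :: tl) := by
          intro x hx
          have hx' : x = a ∨ x = b ∨ x = c := by simpa using hx
          apply (PySem.Set.mem_ofList ..).mpr
          rcases hx' with rfl | rfl | rfl
          · exact List.mem_cons_self ..
          · exact List.mem_cons_of_mem _ hb.1
          · exact List.mem_cons_of_mem _ hc2.1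
        have hnd3 : ([a, b, c] : List Int).Nodup := by
          simp [hb.2.symm, hc2.2.symm]
          exact fun h => hcb h.symm
        have h3 : 3 ≤ (PySem.Set.ofList (a :: tl)).length :=
          (List.subperm_of_subset hnd3 hsub).length_le
        rw [if_neg (by omega)]
        simp [calcula_pontos_full_house_alt, hhead, hr, hanyT]
      · push Not at hany
        have hanyF : (b :: resto').any (fun x => x != b) = false := by
          simp only [List.any_eq_false]; intro x hx; simpa using hany x hx
        have hmem2 : ∀ x ∈ a :: tl, x = a ∨ x = b := by
          intro x hx
          by_cases hxa : x = a
          · exact Or.inl hxa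
          · right
            rcases List.mem_cons.mp hx with h | h
            · exact absurd h hxa
            · have hxr : x ∈ tl.filter (fun y => y != a) :=
                List.mem_filter.mpr ⟨h, by simpa using hxa⟩
              rw [hr] at hxr
              exact hany x hxr
        have hperm : (PySem.Set.ofList (a :: tl)).Perm [a, b] := by
          apply (List.perm_ext_iff_of_nodup (PySem.Set.nodup_ofList _) (by simp [hb.2.symm])).mpr
          intro x
          rw [PySem.Set.mem_ofList]
          constructor
          · intro hx; simpa using hmem2 x hx
          · intro hx
            rcases (by simpa using hx : x = a ∨ x = b) with rfl | rfl
            · exact List.mem_cons_self ..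
            · exact List.mem_cons_of_mem _ hb.1
        have hlen2 : (PySem.Set.ofList (a :: tl)).length = 2 := by
          simpa using hperm.length_eq
        have hca : (a :: tl).count a + (b :: resto').length = (a :: tl).length := by
          rw [← hr, ← hhead]
          rw [List.count_eq_countP, ← List.countP_eq_length_filter]
          have hpe : (fun x : Int => !(x == a)) = (fun x : Int => x != a) := by
            funext x; simp [bne]
          rw [← hpe]
          simpa using (List.length_eq_countP_add_countP (fun x : Int => x == a)
            (l := (a :: tl))).symm
        have hcb : (a :: tl).count b = (b :: resto').length := by
          have h1 : ((a :: tl).filter (fun x => x != a)).count b = (a :: tl).count b :=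
            List.count_filter (by simpa using hb.2)
          rw [hhead, hr] at h1
          rw [← h1]
          exact List.count_eq_length.mpr (fun x hx => (hany x hx).symm)
        have hmap : (((PySem.Set.ofList (a :: tl)).map
              (fun k => (((a :: tl).count k : Int)))).countP (fun q => decide (q = 2 ∨ q = 3)))
            = (([(((a :: tl).count a : Int)), (((a :: tl).count b : Int))]).countP
              (fun q => decide (q = 2 ∨ q = 3))) :=
          (hperm.map _).countP_eq _
        rw [if_pos hlen2, hmap]
        simp only [calcula_pontos_full_house_alt, hhead, hr, hanyF, Bool.false_eq_true,
          if_false, List.countP_cons, List.countP_nil]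
        have hcond : ((0 + (if decide ((((a :: tl).count b : Int)) = 2 ∨ (((a :: tl).count b : Int)) = 3) then 1 else 0)
              + (if decide ((((a :: tl).count a : Int)) = 2 ∨ (((a :: tl).count a : Int)) = 3) then 1 else 0)) = 2)
            ↔ ((((((a :: tl).length : Int)) - (((b :: resto').length : Int))) = 2
                  ∨ ((((a :: tl).length : Int)) - (((b :: resto').length : Int))) = 3)
                ∧ ((((b :: resto').length : Int)) = 2 ∨ (((b :: resto').length : Int)) = 3)) := by
          split_ifs <;> simp_all <;> omega
        rw [if_congr hcond rfl rfl]

-- ===== VERDICT (by name: the statement is the Claim_ definition above) =====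
theorem calcula_pontos_full_house_spec : Claim_equal_calcula_pontos_full_house := by
  intro dados _
  unfold Spec_calcula_pontos_full_house
  exact pv_main dados
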